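-- pv_equiv track=rewrite | github.com/by07-create/ProjectionApp | sportsgameodds_app.py | find_market
-- ===== SOURCE A (Python) =====
-- MARKET_MAP = {
--     "Pass Yards": ["Passing Yards", "Pass Yds"],
--     "Pass TDs": ["Passing TDs", "Pass Touchdowns", "Passing Touchdowns"],
--     "Rush Yards": ["Rushing Yards", "Rush Yds"],
--     "Rush TDs": ["Rushing TDs", "Rush Touchdowns"],
--     "Receptions": ["Receptions"],
--     "Receiving Yards": ["Receiving Yards", "Rec Yds"],
--     "Receiving TDs": ["Receiving TDs", "Rec Touchdowns"],
--     # numeric total TD aliases (YN yes/no markets handled specially)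
--     "Total Touchdowns": ["Player Touchdowns", "Any Touchdowns", "Any TDs", "Touchdowns"]
-- }
--
-- SKIP_PATTERNS = [
--     "alt", "alternate", "1h", "2h", "first half", "second half", "half",
--     "quarter", "q1", "q2", "q3", "q4", "home", "away", "team", "team total", "home team",
--     "away team", "odds to", "ou", "open", "alternate"
-- ]
--
-- def normalize(s: str):
--     return (s or "").lower().strip()
--
-- def contains_skip_pattern(text: str):
--     t = normalize(text)
--     for p in SKIP_PATTERNS:
--         if p in t:
--             return True
--     return False
--
-- def market_text_matches(aliases, market_text, market_raw):
--     m_clean = ''.join([c for c in normalize(market_text) if c.isalpha()])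
--     raw_clean = ''.join([c for c in normalize(market_raw) if c.isalpha()])
--     for a in aliases:
--         a_clean = ''.join([c for c in normalize(a) if c.isalpha()])
--         if a_clean and (a_clean in m_clean or a_clean in raw_clean):
--             return True
--     return False
--
-- def find_market(stat, player_rows):
--     """Find a single, game-level matching market for stat (skip partials/alt/home/away)."""
--     aliases = MARKET_MAP.get(stat, [stat])
--     # first pass: precise textual match excluding skipped markets
--     for r in player_rows:
--         market = r.get("Market","") or ""
--         raw = r.get("MarketRaw","") or ""
--         if contains_skip_pattern(market) or contains_skip_pattern(raw):
--             continue
--         if market_text_matches(aliases, market, raw):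
--             return r
--     # fallback: looser match but still exclude skip patterns
--     for r in player_rows:
--         market = r.get("Market","") or ""
--         raw = r.get("MarketRaw","") or ""
--         if contains_skip_pattern(market) or contains_skip_pattern(raw):
--             continue
--         m = normalize(market)
--         for a in aliases:
--             if normalize(a) in m:
--                 return r
--     return None
-- ===== SOURCE B (Python) =====
-- MARKET_MAP = {
--     "Pass Yards": ["Passing Yards", "Pass Yds"],
--     "Pass TDs": ["Passing TDs", "Pass Touchdowns", "Passing Touchdowns"],
--     "Rush Yards": ["Rushing Yards", "Rush Yds"],
--     "Rush TDs": ["Rushing TDs", "Rush Touchdowns"],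
--     "Receptions": ["Receptions"],
--     "Receiving Yards": ["Receiving Yards", "Rec Yds"],
--     "Receiving TDs": ["Receiving TDs", "Rec Touchdowns"],
--     "Total Touchdowns": ["Player Touchdowns", "Any Touchdowns", "Any TDs", "Touchdowns"]
-- }
--
-- SKIP_PATTERNS = [
--     "alt", "alternate", "1h", "2h", "first half", "second half", "half",
--     "quarter", "q1", "q2", "q3", "q4", "home", "away", "team", "team total", "home team",
--     "away team", "odds to", "ou", "open", "alternate"
-- ]
--
-- def normalize(s: str):
--     return (s or "").lower().strip()
--
-- def contains_skip_pattern(text: str):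
--     t = normalize(text)
--     return any(p in t for p in SKIP_PATTERNS)
--
-- def market_text_matches(aliases, market_text, market_raw):
--     m_clean = ''.join([c for c in normalize(market_text) if c.isalpha()])
--     raw_clean = ''.join([c for c in normalize(market_raw) if c.isalpha()])
--     for a in aliases:
--         a_clean = ''.join([c for c in normalize(a) if c.isalpha()])
--         if a_clean and (a_clean in m_clean or a_clean in raw_clean):
--             return True
--     return False
--
-- def fallback_matches(aliases, market):
--     m = normalize(market)
--     return any(normalize(a) in m for a in aliases)
--
-- def find_market(stat, player_rows):
--     """Single pass: return the first precise match; otherwise remember the first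
--     fallback match and return it after the loop (precise matches always win)."""
--     aliases = MARKET_MAP.get(stat, [stat])
--     fallback = None
--     for r in player_rows:
--         market = r.get("Market", "") or ""
--         raw = r.get("MarketRaw", "") or ""
--         if contains_skip_pattern(market) or contains_skip_pattern(raw):
--             continue
--         if market_text_matches(aliases, market, raw):
--             return r
--         if fallback is None and fallback_matches(aliases, market):
--             fallback = r
--     return fallback
-- ===== Notes on version B (the rewrite author's own statement) =====
-- stated objective: alternative
-- what changed: A's two sequential scans over player_rows (precise pass, then fallback pass) are fused into a single loop that returns a precise match immediately and remembers only the first fallback-matching row, returned after the loop if no precise match exists.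
import Mathlib
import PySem

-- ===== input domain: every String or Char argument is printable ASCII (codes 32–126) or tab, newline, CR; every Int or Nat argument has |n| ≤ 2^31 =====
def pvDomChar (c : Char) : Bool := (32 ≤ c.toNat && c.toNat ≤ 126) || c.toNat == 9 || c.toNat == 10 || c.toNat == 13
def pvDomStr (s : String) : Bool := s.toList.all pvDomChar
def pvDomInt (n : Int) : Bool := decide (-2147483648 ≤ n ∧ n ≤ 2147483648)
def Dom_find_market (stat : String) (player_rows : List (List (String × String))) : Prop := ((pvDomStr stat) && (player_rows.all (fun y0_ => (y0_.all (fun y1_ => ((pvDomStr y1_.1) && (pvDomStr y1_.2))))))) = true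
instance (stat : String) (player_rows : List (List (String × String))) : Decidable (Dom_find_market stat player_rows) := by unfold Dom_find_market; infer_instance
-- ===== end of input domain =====

-- B replaces A's two sequential scans by one pass that returns a precise match
-- immediately and keeps the first fallback match for after the loop (objective:
-- same cost, different decomposition).

-- ===== PORT A =====
-- shared module-level helpers (identical source code in Source A and Source B)
def pvMarketMap : PySem.Dict String (List String) := PySem.Dict.ofList [
  ("Pass Yards", ["Passing Yards", "Pass Yds"]),
  ("Pass TDs", ["Passing TDs", "Pass Touchdowns", "Passing Touchdowns"]),
  ("Rush Yards", ["Rushing Yards", "Rush Yds"]),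
  ("Rush TDs", ["Rushing TDs", "Rush Touchdowns"]),
  ("Receptions", ["Receptions"]),
  ("Receiving Yards", ["Receiving Yards", "Rec Yds"]),
  ("Receiving TDs", ["Receiving TDs", "Rec Touchdowns"]),
  ("Total Touchdowns", ["Player Touchdowns", "Any Touchdowns", "Any TDs", "Touchdowns"])]

def pvSkipPatterns : List String := [
  "alt", "alternate", "1h", "2h", "first half", "second half", "half",
  "quarter", "q1", "q2", "q3", "q4", "home", "away", "team", "team total", "home team",
  "away team", "odds to", "ou", "open", "alternate"]

-- normalize(s) = (s or "").lower().strip(); "" or "" is "", so just lower-then-strip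
def pvNormalize (s : String) : String := PySem.Str.strip (PySem.Str.lower s)

def pvContainsSkip (text : String) : Bool :=
  pvSkipPatterns.any (fun p => PySem.Str.isIn p (pvNormalize text))

-- ''.join([c for c in normalize(s) if c.isalpha()]) kept as a List Char
def pvClean (s : String) : List Char :=
  (pvNormalize s).toList.filter PySem.Chars.isalpha

def pvMarketTextMatches (aliases : List String) (market_text market_raw : String) : Bool :=
  let m_clean := pvClean market_text
  let raw_clean := pvClean market_raw
  aliases.any (fun a =>
    let a_clean := pvClean a
    !a_clean.isEmpty && (PySem.Chars.isIn a_clean m_clean || PySem.Chars.isIn a_clean raw_clean))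

-- r.get(k, "") or "" : first-match association-list lookup, default ""
def pvRowGet (r : List (String × String)) (k : String) : String :=
  match r.find? (fun p => p.1 == k) with
  | some p => p.2
  | none => ""

def pvPass1 (aliases : List String) : List (List (String × String)) → Option (List (String × String))
  | [] => none
  | r :: rest =>
    let market := pvRowGet r "Market"
    let raw := pvRowGet r "MarketRaw"
    if pvContainsSkip market || pvContainsSkip raw then pvPass1 aliases rest
    else if pvMarketTextMatches aliases market raw then some r
    else pvPass1 aliases rest

def pvPass2 (aliases : List String) : List (List (String × String)) → Option (List (String × String))
  | [] => none
  | r :: rest =>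
    let market := pvRowGet r "Market"
    let raw := pvRowGet r "MarketRaw"
    if pvContainsSkip market || pvContainsSkip raw then pvPass2 aliases rest
    else
      let m := pvNormalize market
      if aliases.any (fun a => PySem.Str.isIn (pvNormalize a) m) then some r
      else pvPass2 aliases rest

def find_market (stat : String) (player_rows : List (List (String × String))) : Option (List (String × String)) :=
  let aliases := pvMarketMap.getD stat [stat]
  match pvPass1 aliases player_rows with
  | some r => some r
  | none => pvPass2 aliases player_rows

-- ===== PORT B =====
-- fallback_matches(aliases, market) from Source B
def pvFallbackMatches (aliases : List String) (market : String) : Bool :=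
  let m := pvNormalize market
  aliases.any (fun a => PySem.Str.isIn (pvNormalize a) m)

-- Source B's single loop; `fallback` is the accumulator
def pvOnePass (aliases : List String) : List (List (String × String)) → Option (List (String × String)) → Option (List (String × String))
  | [], fallback => fallback
  | r :: rest, fallback =>
    let market := pvRowGet r "Market"
    let raw := pvRowGet r "MarketRaw"
    if pvContainsSkip market || pvContainsSkip raw then pvOnePass aliases rest fallback
    else if pvMarketTextMatches aliases market raw then some r
    else if fallback.isNone && pvFallbackMatches aliases market then pvOnePass aliases rest (some r)
    else pvOnePass aliases rest fallback

def find_market_alt (stat : String) (player_rows : List (List (String × String))) : Option (List (String × String)) :=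
  let aliases := pvMarketMap.getD stat [stat]
  pvOnePass aliases player_rows none

-- ===== PRECONDITION & SPEC =====
def Spec_find_market (stat : String) (player_rows : List (List (String × String))) (out : Option (List (String × String))) : Prop := out = find_market_alt stat player_rows
instance (stat : String) (player_rows : List (List (String × String))) (out : Option (List (String × String))) : Decidable (Spec_find_market stat player_rows out) := by unfold Spec_find_market; infer_instance

-- ===== CLAIM (what is proved, stated in full; the proofs are below) =====
def Claim_equal_find_market : Prop := ∀ (stat : String) (player_rows : List (List (String × String))), Dom_find_market stat player_rows → Spec_find_market stat player_rows (find_market stat player_rows)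

-- ===== LEMMAS AND PROOFS =====

-- one pass with fallback accumulator = pass1, else the stored fallback, else pass2
lemma pvOnePass_eq (aliases : List String) (rows : List (List (String × String)))
    (fb : Option (List (String × String))) :
    pvOnePass aliases rows fb =
      match pvPass1 aliases rows with
      | some r => some r
      | none => match fb with
        | some f => some f
        | none => pvPass2 aliases rows := by
  induction rows generalizing fb with
  | nil => cases fb <;> simp [pvOnePass, pvPass1, pvPass2]
  | cons r rest ih =>
    simp only [pvOnePass, pvPass1, pvPass2]
    by_cases hskip : (pvContainsSkip (pvRowGet r "Market") || pvContainsSkip (pvRowGet r "MarketRaw")) = true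
    · simp only [hskip, if_true, ih]
    · by_cases hprec : pvMarketTextMatches aliases (pvRowGet r "Market") (pvRowGet r "MarketRaw") = true
      · simp [hskip, hprec]
      · cases fb with
        | some f =>
          simp only [hskip, hprec, Bool.false_eq_true, if_false, Option.isNone_some,
            Bool.false_and, ih]
        | none =>
          by_cases hfm : pvFallbackMatches aliases (pvRowGet r "Market") = true
          · have hfm' := hfm
            simp only [pvFallbackMatches] at hfm'
            simp only [hskip, hprec, Bool.false_eq_true, if_false, Option.isNone_none,
              Bool.true_and, hfm, if_true, ih, hfm']
          · have hfm' : ¬ pvFallbackMatches aliases (pvRowGet r "Market") = true := hfm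
            simp only [pvFallbackMatches] at hfm'
            simp only [hskip, hprec, Bool.false_eq_true, if_false, Option.isNone_none,
              Bool.true_and, hfm, ih, hfm', if_false]

-- ===== VERDICT (by name: the statement is the Claim_ definition above) =====
theorem find_market_spec : Claim_equal_find_market := by
  intro stat rows _
  unfold Spec_find_market find_market find_market_alt
  rw [pvOnePass_eq]
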